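-- pv_equiv track=rewrite | github.com/germanrud/python-algo-1 | recuperatorioPython.py | obtener_lista_de_seguidillas_version_mateo
-- ===== SOURCE A (Python) =====
-- def obtener_lista_de_seguidillas_version_mateo(calificaciones:list[int], nota_minima:int) -> list[list[int]]:
--     lista_de_listas:list[list[int]] = []
--     lista_de_nums:list[int] = []
--     for i in range(len(calificaciones)):
--         if calificaciones[i]>=nota_minima:
--             lista_de_nums.append(calificaciones[i])
--             if i==len(calificaciones)-1:
--                 lista_de_listas.append(lista_de_nums)
--         if  calificaciones[i]<nota_minima and lista_de_nums!= []:
--             lista_de_listas.append(lista_de_nums)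
--             lista_de_nums = []
--     return lista_de_listas
-- ===== SOURCE B (Python) =====
-- def obtener_lista_de_seguidillas_version_mateo(calificaciones: list[int], nota_minima: int) -> list[list[int]]:
--     res: list[list[int]] = []
--     i, n = 0, len(calificaciones)
--     while i < n:
--         if calificaciones[i] >= nota_minima:
--             j = i + 1
--             while j < n and calificaciones[j] >= nota_minima:
--                 j += 1
--             res.append(calificaciones[i:j])
--             i = j
--         else:
--             i += 1
--     return res
-- ===== Notes on version B (the rewrite author's own statement) =====
-- stated objective: alternative
-- what changed: Replaces A's element-by-element accumulator/flush state machine (with its special is-last-index check) by a two-pointer scan that finds each maximal run of passing grades at once and appends the slice.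
import Mathlib
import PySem

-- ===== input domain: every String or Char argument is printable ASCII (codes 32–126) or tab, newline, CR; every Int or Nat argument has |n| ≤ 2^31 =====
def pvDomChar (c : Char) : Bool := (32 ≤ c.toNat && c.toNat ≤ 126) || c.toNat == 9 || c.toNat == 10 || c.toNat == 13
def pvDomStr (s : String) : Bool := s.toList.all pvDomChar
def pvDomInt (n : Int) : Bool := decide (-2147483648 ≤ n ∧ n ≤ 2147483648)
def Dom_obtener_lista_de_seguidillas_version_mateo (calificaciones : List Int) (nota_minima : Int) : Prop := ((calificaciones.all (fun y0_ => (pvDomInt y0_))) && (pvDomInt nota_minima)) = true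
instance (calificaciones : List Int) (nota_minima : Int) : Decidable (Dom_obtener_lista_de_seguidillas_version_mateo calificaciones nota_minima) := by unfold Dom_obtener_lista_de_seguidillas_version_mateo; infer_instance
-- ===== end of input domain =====

-- B replaces A's element-by-element accumulator/flush state machine by a two-pointer scan
-- that emits each maximal run of passing grades at once (objective: alternative).

-- ===== PORT A =====
-- Python A loops `for i in range(len(calificaciones))` and reads calificaciones[i];
-- i is always in range, so `getD i 0` is exact for calificaciones[i].
def obtener_lista_de_seguidillas_version_mateo (calificaciones : List Int) (nota_minima : Int) : List (List Int) :=
  ((List.range calificaciones.length).foldl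
    (fun (st : List (List Int) × List Int) (i : Nat) =>
      let c := calificaciones.getD i 0
      let p :=
        if nota_minima ≤ c then
          ((if i = calificaciones.length - 1 then st.1 ++ [st.2 ++ [c]] else st.1), st.2 ++ [c])
        else (st.1, st.2)
      if c < nota_minima ∧ p.2 ≠ [] then (p.1 ++ [p.2], ([] : List Int)) else p)
    ([], [])).1

-- ===== PORT B =====
-- Source B: outer while over i; on a passing grade, inner while advances j past the run
-- (= takeWhile/dropWhile on the remainder) and appends the slice calificaciones[i:j].
def pvGoB (nota_minima : Int) : List Int → List (List Int)
  | [] => []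
  | x :: xs =>
    if nota_minima ≤ x then
      (x :: xs.takeWhile (fun z => decide (nota_minima ≤ z)))
        :: pvGoB nota_minima (xs.dropWhile (fun z => decide (nota_minima ≤ z)))
    else pvGoB nota_minima xs
termination_by l => l.length
decreasing_by
  · simpa using Nat.lt_succ_of_le (List.length_dropWhile_le _ _)
  · simp

def obtener_lista_de_seguidillas_version_mateo_alt (calificaciones : List Int) (nota_minima : Int) : List (List Int) :=
  pvGoB nota_minima calificaciones

-- ===== PRECONDITION & SPEC =====
def Spec_obtener_lista_de_seguidillas_version_mateo (calificaciones : List Int) (nota_minima : Int) (out : List (List Int)) : Prop := out = obtener_lista_de_seguidillas_version_mateo_alt calificaciones nota_minima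
instance (calificaciones : List Int) (nota_minima : Int) (out : List (List Int)) : Decidable (Spec_obtener_lista_de_seguidillas_version_mateo calificaciones nota_minima out) := by unfold Spec_obtener_lista_de_seguidillas_version_mateo; infer_instance

-- ===== CLAIM (what is proved, stated in full; the proofs are below) =====
def Claim_equal_obtener_lista_de_seguidillas_version_mateo : Prop := ∀ (calificaciones : List Int) (nota_minima : Int), Dom_obtener_lista_de_seguidillas_version_mateo calificaciones nota_minima → Spec_obtener_lista_de_seguidillas_version_mateo calificaciones nota_minima (obtener_lista_de_seguidillas_version_mateo calificaciones nota_minima)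

-- ===== LEMMAS AND PROOFS =====

-- structural restatement of A's loop (state machine over the list, "is last index" = tail empty)
def pvSM (m : Int) : List Int → List (List Int) → List Int → List (List Int)
  | [], res, _ => res
  | x :: xs, res, nums =>
    if m ≤ x then
      pvSM m xs (if xs = [] then res ++ [nums ++ [x]] else res) (nums ++ [x])
    else
      pvSM m xs (if nums ≠ [] then res ++ [nums] else res) []

-- pvSM with the accumulated result factored out
def pvCont (m : Int) : List Int → List Int → List (List Int)
  | _, [] => []
  | nums, x :: xs =>
    if m ≤ x then
      (if xs = [] then [nums ++ [x]] else pvCont m (nums ++ [x]) xs)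
    else (if nums ≠ [] then nums :: pvCont m [] xs else pvCont m [] xs)

lemma pv_getD_append (pref : List Int) (c : Int) (cs : List Int) :
    (pref ++ c :: cs).getD pref.length 0 = c := by
  induction pref with
  | nil => rfl
  | cons h t ih => simpa using ih

lemma pv_foldA (m : Int) : ∀ (cs pref : List Int) (st : List (List Int) × List Int),
    ((List.range' pref.length cs.length).foldl
      (fun (st : List (List Int) × List Int) (i : Nat) =>
        let c := (pref ++ cs).getD i 0
        let p :=
          if m ≤ c then
            ((if i = (pref ++ cs).length - 1 then st.1 ++ [st.2 ++ [c]] else st.1), st.2 ++ [c])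
          else (st.1, st.2)
        if c < m ∧ p.2 ≠ [] then (p.1 ++ [p.2], ([] : List Int)) else p)
      st).1 = pvSM m cs st.1 st.2 := by
  intro cs
  induction cs with
  | nil => intro pref st; simp [pvSM]
  | cons c cs ih =>
    intro pref st
    rw [List.length_cons, List.range'_succ, List.foldl_cons]
    have hlast : (pref.length = (pref ++ c :: cs).length - 1) ↔ cs = [] := by
      simp only [List.length_append, List.length_cons]
      constructor
      · intro h
        have : cs.length = 0 := by omega
        exact List.length_eq_zero_iff.mp this
      · intro h; subst h; simp
    have hget := pv_getD_append pref c cs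
    have hcast : pref.length + 1 = (pref ++ [c]).length := by simp
    have hsplit : pref ++ c :: cs = (pref ++ [c]) ++ cs := by simp
    by_cases hm : m ≤ c
    · simp only [hget, hm, if_pos]
      have hnlt : ¬ (c < m ∧ (st.2 ++ [c]) ≠ []) := by
        rintro ⟨h1, _⟩; omega
      simp only [hnlt, if_false, if_neg]
      by_cases hnil : cs = []
      · subst hnil
        rw [if_pos (hlast.mpr rfl)]
        simp [pvSM, hm]
      · rw [if_neg (fun h => hnil (hlast.mp h))]
        rw [hcast]
        conv_lhs => rw [hsplit]
        rw [ih]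
        simp [pvSM, hm, hnil]
    · have hlt : c < m := by omega
      simp only [hget, hm, if_neg, if_false]
      rw [hcast]
      conv_lhs => rw [hsplit]
      by_cases hne : st.2 ≠ []
      · simp only [hlt, hne, and_self, if_true, true_and, if_pos]
        rw [ih]
        simp [pvSM, hm, hne]
      · simp only [hlt, hne, and_false, if_false, true_and, if_neg]
        push_neg at hne
        rw [ih]
        simp [pvSM, hm, hne]

lemma pvA_eq_SM (cs : List Int) (m : Int) :
    obtener_lista_de_seguidillas_version_mateo cs m = pvSM m cs [] [] := by
  unfold obtener_lista_de_seguidillas_version_mateo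
  rw [List.range_eq_range']
  have h := pv_foldA m cs [] (([], []) : List (List Int) × List Int)
  simpa using h

lemma pvSM_eq_cont (m : Int) : ∀ (xs : List Int) (res : List (List Int)) (nums : List Int),
    pvSM m xs res nums = res ++ pvCont m nums xs := by
  intro xs
  induction xs with
  | nil => intro res nums; simp [pvSM, pvCont]
  | cons x xs ih =>
    intro res nums
    by_cases hm : m ≤ x
    · by_cases hnil : xs = []
      · subst hnil; simp [pvSM, pvCont, hm]
      · simp [pvSM, pvCont, hm, hnil, ih]
    · by_cases hne : nums ≠ []
      · simp [pvSM, pvCont, hm, hne, ih]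
      · simp [pvSM, pvCont, hm, hne, ih]

lemma pv_subA (m : Int) : ∀ (ys nums : List Int) (y : Int), m ≤ y →
    (∀ zs : List Int, zs.length < ys.length → pvCont m [] zs = pvGoB m zs) →
    pvCont m nums (y :: ys) =
      (nums ++ y :: ys.takeWhile (fun z => decide (m ≤ z)))
        :: pvGoB m (ys.dropWhile (fun z => decide (m ≤ z))) := by
  intro ys
  induction ys with
  | nil =>
    intro nums y hy _
    simp [pvCont, pvGoB, hy]
  | cons z zs ih =>
    intro nums y hy hrec
    have h1 : pvCont m nums (y :: z :: zs) = pvCont m (nums ++ [y]) (z :: zs) := by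
      simp [pvCont, hy]
    rw [h1]
    by_cases hz : m ≤ z
    · rw [ih (nums ++ [y]) z hz (fun ws hws => hrec ws (by simpa using Nat.lt_succ_of_lt hws))]
      simp [List.takeWhile, List.dropWhile, hz]
    · have h2 : pvCont m (nums ++ [y]) (z :: zs) = (nums ++ [y]) :: pvCont m [] zs := by
        simp [pvCont, hz]
      rw [h2, hrec zs (by simp)]
      have h3 : pvGoB m (z :: zs) = pvGoB m zs := by simp [pvGoB, hz]
      simp [List.takeWhile, List.dropWhile, hz, h3]

lemma pvCont_eq_goB (m : Int) (cs : List Int) : pvCont m [] cs = pvGoB m cs := by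
  have main : ∀ n (cs : List Int), cs.length ≤ n → pvCont m [] cs = pvGoB m cs := by
    intro n
    induction n with
    | zero =>
      intro cs hcs
      have : cs = [] := List.length_eq_zero_iff.mp (Nat.le_zero.mp hcs)
      subst this; simp [pvCont, pvGoB]
    | succ n ih =>
      intro cs hcs
      match cs with
      | [] => simp [pvCont, pvGoB]
      | x :: xs =>
        by_cases hm : m ≤ x
        · rw [pv_subA m xs [] x hm
            (fun zs hzs => ih zs (by simp at hcs; omega))]
          simp [pvGoB, hm]
        · have h1 : pvCont m [] (x :: xs) = pvCont m [] xs := by simp [pvCont, hm]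
          have h2 : pvGoB m (x :: xs) = pvGoB m xs := by simp [pvGoB, hm]
          rw [h1, h2]
          exact ih xs (by simp at hcs; omega)
  exact main cs.length cs le_rfl

-- ===== VERDICT (by name: the statement is the Claim_ definition above) =====
theorem obtener_lista_de_seguidillas_version_mateo_spec : Claim_equal_obtener_lista_de_seguidillas_version_mateo := by
  intro cs m _
  unfold Spec_obtener_lista_de_seguidillas_version_mateo obtener_lista_de_seguidillas_version_mateo_alt
  rw [pvA_eq_SM, pvSM_eq_cont, pvCont_eq_goB]
  simp
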